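-- pv_equiv track=rewrite | github.com/Oralbaev/nonogram-solver | parser.py | build_col_clues
-- ===== SOURCE A (Python) =====
-- def build_col_clues(top_recognized: list) -> list:
--     """
--     Build col_clues from the top clue area recognition results.
--
--     top_recognized : 2-D list [N_top_rows][COLS] of None | int
--                      produced by recognize_cells_batch on top_clues_area.
--
--     For each column, read cells top → bottom, drop None, keep integers.
--
--     Example:
--         column [None, 2, 1] → [2, 1]
--         column [None, None, 6] → [6]
--         column [None, None, None] → []
--
--     Returns list of COLS inner lists, each containing only integers.
--     """
--     if not top_recognized:
--         return []
--     n_cols = len(top_recognized[0])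
--     col_clues = []
--     for c in range(n_cols):
--         clues = [top_recognized[r][c]
--                  for r in range(len(top_recognized))
--                  if top_recognized[r][c] is not None]
--         col_clues.append(clues)
--     return col_clues
-- ===== SOURCE B (Python) =====
-- def build_col_clues(top_recognized: list) -> list:
--     """Recursive column peeling: strip the first cell of every row to form
--     one column, then recurse on the row tails. No indexing at all."""
--     if not top_recognized:
--         return []
--
--     def peel(rows, k):
--         if k == 0:
--             return []
--         col = [r[0] for r in rows if r[0] is not None]
--         return [col] + peel([r[1:] for r in rows], k - 1)
--
--     return peel(top_recognized, len(top_recognized[0]))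
-- ===== Notes on version B (the rewrite author's own statement) =====
-- stated objective: alternative
-- what changed: A scans the grid once per column with explicit row/column indexing; B is a head/tail column-peeling recursion that strips the first cell of every row to form a column and recurses on the row tails, using no indices.
import Mathlib
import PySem

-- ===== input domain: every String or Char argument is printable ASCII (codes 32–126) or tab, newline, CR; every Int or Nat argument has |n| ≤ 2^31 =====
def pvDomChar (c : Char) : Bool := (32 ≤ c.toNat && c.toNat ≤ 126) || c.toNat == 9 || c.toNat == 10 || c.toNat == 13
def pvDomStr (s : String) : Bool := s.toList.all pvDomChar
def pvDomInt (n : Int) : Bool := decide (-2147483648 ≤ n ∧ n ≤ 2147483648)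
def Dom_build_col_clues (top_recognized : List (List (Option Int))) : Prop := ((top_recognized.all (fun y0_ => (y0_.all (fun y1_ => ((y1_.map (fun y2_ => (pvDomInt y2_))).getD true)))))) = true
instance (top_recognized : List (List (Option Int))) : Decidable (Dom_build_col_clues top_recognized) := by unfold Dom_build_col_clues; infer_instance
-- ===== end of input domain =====

-- B replaces A's per-column indexed scans with a head/tail column-peeling recursion with no indexing (alternative decomposition; slower on wide grids since tail slices copy).


-- ===== PORT A =====
-- Column-by-column: for each c < n_cols, one comprehension scanning all rows, keeping non-None.
-- Inside Pre_ every indexed access is in range, so getD never takes its default.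
def build_col_clues (top_recognized : List (List (Option Int))) : List (List Int) :=
  if top_recognized = [] then []
  else
    let n_cols := (top_recognized.headD []).length
    (List.range n_cols).map (fun c =>
      (List.range top_recognized.length).filterMap
        (fun r => ((top_recognized.getD r []).getD c none)))

-- ===== PORT B =====
-- peel: first cells of all rows form one column (dropping none), recurse on the tails.
-- r[0] → r.getD 0 none (in range inside Pre_), r[1:] → r.drop 1.
def bccPeel : List (List (Option Int)) → Nat → List (List Int)
  | _, 0 => []
  | rows, k + 1 =>
      (rows.filterMap (fun r => r.getD 0 none))
        :: bccPeel (rows.map (fun r => r.drop 1)) k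

def build_col_clues_alt (top_recognized : List (List (Option Int))) : List (List Int) :=
  if top_recognized = [] then []
  else bccPeel top_recognized (top_recognized.headD []).length

-- ===== PRECONDITION & SPEC =====
-- Pre_ excludes ragged grids where some row is shorter than the first row: there the Python A
-- (and B alike) raises IndexError.
def Pre_build_col_clues (top_recognized : List (List (Option Int))) : Prop :=
  ∀ row ∈ top_recognized, (top_recognized.headD []).length ≤ row.length
instance (top_recognized : List (List (Option Int))) : Decidable (Pre_build_col_clues top_recognized) := by unfold Pre_build_col_clues; infer_instance
def pvWitness_build_col_clues : List (List (Option Int)) := [[some 1, none], [none, some 2]]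

def Spec_build_col_clues (top_recognized : List (List (Option Int))) (out : List (List Int)) : Prop := out = build_col_clues_alt top_recognized
instance (top_recognized : List (List (Option Int))) (out : List (List Int)) : Decidable (Spec_build_col_clues top_recognized out) := by unfold Spec_build_col_clues; infer_instance

-- ===== CLAIM (what is proved, stated in full; the proofs are below) =====
def Claim_equal_build_col_clues : Prop := ∀ (top_recognized : List (List (Option Int))), Dom_build_col_clues top_recognized → Pre_build_col_clues top_recognized → Spec_build_col_clues top_recognized (build_col_clues top_recognized)

-- ===== LEMMAS AND PROOFS =====

-- A's range-indexed comprehension equals a direct filterMap over the rows.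
theorem bcc_range_filterMap (l : List (List (Option Int))) (c : Nat) :
    (List.range l.length).filterMap (fun r => ((l.getD r []).getD c none))
      = l.filterMap (fun row => row.getD c none) := by
  induction l with
  | nil => simp
  | cons row rs ih =>
    simp only [List.getD] at ih ⊢
    simp only [List.length_cons, List.range_succ_eq_map, List.filterMap_cons,
      List.filterMap_map]
    cases h : row[c]?.getD none <;> simp [h, ← ih]

-- the peeled tails read at column c are the original rows read at column c+1
theorem bcc_drop_getD (rows : List (List (Option Int))) (c : Nat) :
    (rows.map (fun r => r.drop 1)).filterMap (fun row => row.getD c none)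
      = rows.filterMap (fun row => row.getD (c + 1) none) := by
  rw [List.filterMap_map]
  apply List.filterMap_congr
  intro r _
  simp [List.getD]

-- characterisation of the peeling recursion as A's column map
theorem bccPeel_eq (k : Nat) (rows : List (List (Option Int))) :
    bccPeel rows k
      = (List.range k).map (fun c => rows.filterMap (fun row => row.getD c none)) := by
  induction k generalizing rows with
  | zero => simp [bccPeel]
  | succ k ih =>
    rw [bccPeel, ih]
    simp only [bcc_drop_getD, List.range_succ_eq_map, List.map_cons, List.map_map,
      Function.comp_def]

theorem build_col_clues_spec : Claim_equal_build_col_clues := by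
  intro g _ _
  unfold Spec_build_col_clues build_col_clues build_col_clues_alt
  cases g with
  | nil => simp
  | cons r0 rs =>
    simp only [if_neg (List.cons_ne_nil r0 rs)]
    rw [bccPeel_eq]
    apply List.map_congr_left
    intro c _
    exact bcc_range_filterMap (r0 :: rs) c
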